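-- pv_equiv track=rewrite | github.com/baihaqi2193/daspro | compsci.py | IsXElmtKeN
-- ===== SOURCE A (Python) =====
-- def IsEmpty(L):
--     if L == []:
--         return True
--     else:
--         return False
--
-- def Tail(L):
--     if not(IsEmpty(L)):
--         return L[1:]
--
-- def FirstElmt(L):
--     return L[0]
--
-- def IsMember(n, L):
--     if IsEmpty(L):
--         return False
--     else :
--         if n == FirstElmt(L):
--             return True
--         else :
--             return IsMember(n,Tail(L))
--
-- def IsXElmtKeN(X,N,L):
--     if IsMember(X,L):
--         if N == 1 :
--             if X == FirstElmt(L):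
--                 return True
--             else:
--                 return False
--         else:
--             return IsXElmtKeN(X,N-1,Tail(L))
--     else:
--         return False
-- ===== SOURCE B (Python) =====
-- def IsXElmtKeN(X, N, L):
--     # B: O(1) direct index check instead of A's repeated membership scans + recursion.
--     return 1 <= N <= len(L) and L[N - 1] == X
-- ===== Notes on version B (the rewrite author's own statement) =====
-- stated objective: faster
-- what changed: Replaced the recursive walk that re-scans the suffix for membership at every step with a single O(1) bounds-check and direct index comparison L[N-1] == X.
import Mathlib
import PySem

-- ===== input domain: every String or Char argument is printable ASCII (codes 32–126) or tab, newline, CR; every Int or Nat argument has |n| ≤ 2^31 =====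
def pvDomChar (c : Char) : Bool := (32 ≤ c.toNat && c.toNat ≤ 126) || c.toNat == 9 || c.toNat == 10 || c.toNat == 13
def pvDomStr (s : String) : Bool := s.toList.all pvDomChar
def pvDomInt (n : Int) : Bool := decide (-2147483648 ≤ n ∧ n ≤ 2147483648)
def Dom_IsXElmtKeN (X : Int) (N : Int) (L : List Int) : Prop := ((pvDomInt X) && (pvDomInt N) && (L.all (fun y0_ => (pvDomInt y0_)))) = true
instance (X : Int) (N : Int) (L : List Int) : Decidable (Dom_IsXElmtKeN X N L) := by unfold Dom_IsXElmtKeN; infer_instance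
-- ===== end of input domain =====

-- B replaces A's recursive walk (which re-scans the suffix for membership at every
-- step) with a single bounds check and one direct index comparison L[N-1] == X.

-- ===== PORT A =====
-- IsMember(n, L): FirstElmt(L) = head, Tail(L) = L[1:] = tail; transliterated as
-- structural recursion on the list.
def pyIsMember (n : Int) (L : List Int) : Bool :=
  match L with
  | [] => false                                   -- IsEmpty(L): return False
  | h :: t => if n == h then true else pyIsMember n t

def IsXElmtKeN (X : Int) (N : Int) (L : List Int) : Bool :=
  if pyIsMember X L then
    match L with
    | [] => false                                 -- unreachable: pyIsMember X [] = false
    | h :: t =>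
      if N == 1 then (if X == h then true else false)
      else IsXElmtKeN X (N - 1) t
  else false

-- ===== PORT B =====
def IsXElmtKeN_alt (X : Int) (N : Int) (L : List Int) : Bool :=
  if 1 ≤ N ∧ N ≤ (L.length : Int) then PySem.List.pyGet? L (N - 1) == some X
  else false

-- ===== PRECONDITION & SPEC =====
def Spec_IsXElmtKeN (X : Int) (N : Int) (L : List Int) (out : Bool) : Prop := out = IsXElmtKeN_alt X N L
instance (X : Int) (N : Int) (L : List Int) (out : Bool) : Decidable (Spec_IsXElmtKeN X N L out) := by unfold Spec_IsXElmtKeN; infer_instance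

-- ===== CLAIM (what is proved, stated in full; the proofs are below) =====
def Claim_equal_IsXElmtKeN : Prop := ∀ (X : Int) (N : Int) (L : List Int), Dom_IsXElmtKeN X N L → Spec_IsXElmtKeN X N L (IsXElmtKeN X N L)

-- ===== LEMMAS AND PROOFS =====

theorem pyIsMember_iff_mem (n : Int) (L : List Int) : pyIsMember n L = true ↔ n ∈ L := by
  induction L with
  | nil => simp [pyIsMember]
  | cons h t ih =>
    simp [pyIsMember]
    by_cases hh : n = h
    · simp [hh]
    · simp [hh, ih]

theorem IsXElmtKeN_eq_alt (X : Int) (N : Int) (L : List Int) :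
    IsXElmtKeN X N L = IsXElmtKeN_alt X N L := by
  induction L generalizing N with
  | nil =>
    simp [IsXElmtKeN, IsXElmtKeN_alt, pyIsMember]
    omega
  | cons h t ih =>
    rw [IsXElmtKeN]
    by_cases hm : pyIsMember X (h :: t) = true
    · simp only [hm, if_true]
      by_cases hN : N = 1
      · subst hN
        have hg : (1:Int) ≤ 1 ∧ (1:Int) ≤ (((h :: t).length) : Int) := by
          constructor
          · omega
          · simp
        simp only [IsXElmtKeN_alt, if_pos hg]
        show _ = (PySem.List.pyGet? (h :: t) (1 - 1) == some X)
        norm_num [PySem.List.pyGet?_zero_cons]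
        rcases eq_or_ne X h with hx | hx
        · simp [hx]
        · simp [hx, Ne.symm hx]
      · have hne : (N == 1) = false := by simp [hN]
        rw [hne]
        simp only [Bool.false_eq_true, if_false]
        rw [ih]
        by_cases hr : 1 ≤ N ∧ N ≤ ((h :: t).length : Int)
        · have hr' : 1 ≤ N - 1 ∧ N - 1 ≤ (t.length : Int) := by
            simp at hr; omega
          simp only [IsXElmtKeN_alt, if_pos hr, if_pos hr']
          have hstep : PySem.List.pyGet? (h :: t) (N - 1) = PySem.List.pyGet? t (N - 1 - 1) := by
            have heq : N - 1 = (N - 2) + 1 := by ring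
            rw [heq]
            have h0 : 0 ≤ N - 2 := by omega
            obtain ⟨k, hk⟩ := Int.eq_ofNat_of_zero_le h0
            rw [hk, PySem.List.pyGet?_cons_succ]
            congr 1
            omega
          rw [hstep]
        · have hr' : ¬ (1 ≤ N - 1 ∧ N - 1 ≤ (t.length : Int)) := by
            simp at hr ⊢
            intro h1
            have := hr (by omega)
            omega
          simp only [IsXElmtKeN_alt, if_neg hr, if_neg hr']
    · simp only [Bool.not_eq_true] at hm
      simp only [hm, Bool.false_eq_true, if_false]
      have hnm : X ∉ h :: t := by
        intro hx
        rw [← pyIsMember_iff_mem] at hx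
        simp [hm] at hx
      rw [IsXElmtKeN_alt]
      by_cases hr : 1 ≤ N ∧ N ≤ ((h :: t).length : Int)
      · rw [if_pos hr]
        cases hg : PySem.List.pyGet? (h :: t) (N - 1) with
        | none => simp
        | some v =>
          have hv : v ∈ h :: t := PySem.List.mem_of_pyGet?_eq_some _ hg
          have hvx : v ≠ X := fun he => hnm (he ▸ hv)
          simp [hvx]
      · rw [if_neg hr]

-- ===== VERDICT (by name: the statement is the Claim_ definition above) =====
theorem IsXElmtKeN_spec : Claim_equal_IsXElmtKeN := by
  intro X N L _
  unfold Spec_IsXElmtKeN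
  exact IsXElmtKeN_eq_alt X N L
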